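-- pv_equiv track=rewrite | github.com/jt-lanl/cov-voc | plotmuts.py | bysite
-- ===== SOURCE A (Python) =====
-- def bysite(parsedlines):
--     prev_site = None
--     bysitelines=[]
--     parsedlines = list(parsedlines) + [(0,0,0,0,0)]
--     for site,ssm,npar,nlin,nseq in parsedlines:
--         if site != prev_site:
--             if prev_site:
--                 bysitelines.append((prev_site,None,snpar,snlin,snseq))
--             snpar = snlin = snseq = 0
--             prev_site = site
--         snpar += npar
--         snlin += nlin
--         snseq += nseq
--
--     return bysitelines
-- ===== SOURCE B (Python) =====
-- def bysite(parsedlines):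
--     # One pass over consecutive runs of equal site: scan ahead to the run's end,
--     # sum the run, emit (site, None, sums); runs with falsy site are dropped
--     # (matching the original's behaviour). No sentinel, no prev_site tracking.
--     xs = list(parsedlines)
--     out = []
--     i = 0
--     n = len(xs)
--     while i < n:
--         site = xs[i][0]
--         j = i
--         while j < n and xs[j][0] == site:
--             j += 1
--         if site:
--             grp = xs[i:j]
--             out.append((site, None,
--                         sum(t[2] for t in grp),
--                         sum(t[3] for t in grp),
--                         sum(t[4] for t in grp)))
--         i = j
--     return out
-- ===== Notes on version B (the rewrite author's own statement) =====
-- stated objective: simpler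
-- what changed: Replaces the sentinel-append plus prev_site/running-accumulator state machine with direct grouping of consecutive equal-site runs (scan to each run's end, sum the run, emit), dropping falsy-site runs as the original does.
import Mathlib
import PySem

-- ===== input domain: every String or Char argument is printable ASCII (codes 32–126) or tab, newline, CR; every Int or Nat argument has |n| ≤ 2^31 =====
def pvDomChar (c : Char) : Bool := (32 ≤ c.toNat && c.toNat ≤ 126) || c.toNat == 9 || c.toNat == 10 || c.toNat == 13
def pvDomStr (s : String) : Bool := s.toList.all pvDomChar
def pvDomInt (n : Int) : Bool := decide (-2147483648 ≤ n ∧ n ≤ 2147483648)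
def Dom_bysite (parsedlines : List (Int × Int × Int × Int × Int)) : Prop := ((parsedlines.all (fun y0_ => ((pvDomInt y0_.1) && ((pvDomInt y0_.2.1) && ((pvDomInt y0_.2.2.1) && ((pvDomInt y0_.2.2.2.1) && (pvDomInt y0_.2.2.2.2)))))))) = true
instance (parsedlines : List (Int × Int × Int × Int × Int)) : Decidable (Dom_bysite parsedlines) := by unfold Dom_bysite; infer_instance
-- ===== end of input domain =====

-- B replaces A's sentinel + prev_site accumulator state machine with direct grouping of
-- consecutive equal-site runs (simpler decomposition; same O(n) cost).

-- ===== PORT A =====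
-- state = (prev_site, snpar, snlin, snseq, bysitelines); the loop body of A, step for step
def bysiteStep (st : Option Int × Int × Int × Int × List (Int × Option Int × Int × Int × Int))
    (t : Int × Int × Int × Int × Int) :
    Option Int × Int × Int × Int × List (Int × Option Int × Int × Int × Int) :=
  match st, t with
  | (prev, sp, sl, sn, acc), (site, _ssm, np, nl, ns) =>
    if some site ≠ prev then
      -- flush (only when prev_site is truthy), reset sums, set prev_site; then += the line
      let acc' := match prev with
        | some p => if p ≠ 0 then acc ++ [(p, none, sp, sl, sn)] else acc
        | none => acc
      (some site, 0 + np, 0 + nl, 0 + ns, acc')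
    else (prev, sp + np, sl + nl, sn + ns, acc)

def bysite (parsedlines : List (Int × Int × Int × Int × Int)) : List (Int × Option Int × Int × Int × Int) :=
  ((parsedlines ++ [(0, 0, 0, 0, 0)]).foldl bysiteStep (none, 0, 0, 0, [])).2.2.2.2

-- ===== PORT B =====
-- B's outer while-loop scans each consecutive run xs[i:j] of equal site; rendered as
-- structural recursion on the list, the run being takeWhile/dropWhile (exact).
def bysite_alt (parsedlines : List (Int × Int × Int × Int × Int)) : List (Int × Option Int × Int × Int × Int) :=
  match parsedlines with
  | [] => []
  | t :: ts =>
    let site := t.1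
    let grp := t :: ts.takeWhile (fun u => u.1 == site)
    let rest := ts.dropWhile (fun u => u.1 == site)
    (if site ≠ 0 then
      [(site, none, (grp.map (fun u => u.2.2.1)).sum,
        (grp.map (fun u => u.2.2.2.1)).sum, (grp.map (fun u => u.2.2.2.2)).sum)]
     else []) ++ bysite_alt rest
termination_by parsedlines.length
decreasing_by
  exact Nat.lt_succ_of_le (List.length_dropWhile_le _ _)

-- ===== PRECONDITION & SPEC =====
def Spec_bysite (parsedlines : List (Int × Int × Int × Int × Int)) (out : List (Int × Option Int × Int × Int × Int)) : Prop := out = bysite_alt parsedlines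
instance (parsedlines : List (Int × Int × Int × Int × Int)) (out : List (Int × Option Int × Int × Int × Int)) : Decidable (Spec_bysite parsedlines out) := by unfold Spec_bysite; infer_instance

-- ===== CLAIM (what is proved, stated in full; the proofs are below) =====
def Claim_equal_bysite : Prop := ∀ (parsedlines : List (Int × Int × Int × Int × Int)), Dom_bysite parsedlines → Spec_bysite parsedlines (bysite parsedlines)

-- ===== LEMMAS AND PROOFS =====

theorem bysite_alt_nil : bysite_alt [] = [] := by
  rw [bysite_alt.eq_def]

-- B generalized to a pending run: site s with partial sums (sp, sl, sn) already read.
def altAux (s sp sl sn : Int) : List (Int × Int × Int × Int × Int) → List (Int × Option Int × Int × Int × Int)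
  | [] => if s ≠ 0 then [(s, none, sp, sl, sn)] else []
  | t :: ts =>
    if t.1 = s then altAux s (sp + t.2.2.1) (sl + t.2.2.2.1) (sn + t.2.2.2.2) ts
    else (if s ≠ 0 then [(s, none, sp, sl, sn)] else []) ++ bysite_alt (t :: ts)

theorem bysite_alt_cons' (t : Int × Int × Int × Int × Int) (ts : List (Int × Int × Int × Int × Int)) :
    bysite_alt (t :: ts) =
      (if t.1 ≠ 0 then
        [(t.1, none, ((t :: ts.takeWhile (fun u => u.1 == t.1)).map (fun u => u.2.2.1)).sum,
          ((t :: ts.takeWhile (fun u => u.1 == t.1)).map (fun u => u.2.2.2.1)).sum,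
          ((t :: ts.takeWhile (fun u => u.1 == t.1)).map (fun u => u.2.2.2.2)).sum)]
       else []) ++ bysite_alt (ts.dropWhile (fun u => u.1 == t.1)) := by
  rw [bysite_alt.eq_def]

theorem altAux_eq (xs : List (Int × Int × Int × Int × Int)) : ∀ (s sp sl sn : Int),
    altAux s sp sl sn xs =
      (if s ≠ 0 then
        [(s, none, sp + ((xs.takeWhile (fun u => u.1 == s)).map (fun u => u.2.2.1)).sum,
          sl + ((xs.takeWhile (fun u => u.1 == s)).map (fun u => u.2.2.2.1)).sum,
          sn + ((xs.takeWhile (fun u => u.1 == s)).map (fun u => u.2.2.2.2)).sum)]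
       else []) ++ bysite_alt (xs.dropWhile (fun u => u.1 == s)) := by
  induction xs with
  | nil => intro s sp sl sn; simp [altAux, bysite_alt_nil]
  | cons t ts ih =>
    intro s sp sl sn
    by_cases h : t.1 = s
    · simp [altAux, h, ih, add_assoc]
    · simp [altAux, h]

theorem bysite_alt_cons (t : Int × Int × Int × Int × Int) (ts : List (Int × Int × Int × Int × Int)) :
    bysite_alt (t :: ts) = altAux t.1 t.2.2.1 t.2.2.2.1 t.2.2.2.2 ts := by
  rw [altAux_eq, bysite_alt_cons']
  simp

-- A's loop, started mid-run with prev_site = some s and partial sums, computes altAux.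
theorem loop_eq (xs : List (Int × Int × Int × Int × Int)) :
    ∀ (s sp sl sn : Int) (acc : List (Int × Option Int × Int × Int × Int)),
    ((xs ++ [(0, 0, 0, 0, 0)]).foldl bysiteStep (some s, sp, sl, sn, acc)).2.2.2.2 =
      acc ++ altAux s sp sl sn xs := by
  induction xs with
  | nil =>
    intro s sp sl sn acc
    by_cases h : s = 0
    · subst h; simp [bysiteStep, altAux]
    · simp [bysiteStep, altAux, h, Ne.symm h]
  | cons t ts ih =>
    intro s sp sl sn acc
    by_cases h : t.1 = s
    · have : bysiteStep (some s, sp, sl, sn, acc) t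
          = (some s, sp + t.2.2.1, sl + t.2.2.2.1, sn + t.2.2.2.2, acc) := by
        simp [bysiteStep, h]
      simp only [List.cons_append, List.foldl_cons, this, ih, altAux, h, if_pos]
    · by_cases hs : s = 0
      · subst hs
        have : bysiteStep (some 0, sp, sl, sn, acc) t
            = (some t.1, 0 + t.2.2.1, 0 + t.2.2.2.1, 0 + t.2.2.2.2, acc) := by
          have h0 : some t.1 ≠ some (0 : Int) := by simpa using h
          simp [bysiteStep, h0]
        simp only [List.cons_append, List.foldl_cons, this, ih, zero_add, ← bysite_alt_cons]
        simp [altAux, h]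
      · have : bysiteStep (some s, sp, sl, sn, acc) t
            = (some t.1, 0 + t.2.2.1, 0 + t.2.2.2.1, 0 + t.2.2.2.2,
               acc ++ [(s, none, sp, sl, sn)]) := by
          simp [bysiteStep, hs]; exact h
        simp only [List.cons_append, List.foldl_cons, this, ih, zero_add, ← bysite_alt_cons]
        simp [altAux, h, hs]

-- ===== VERDICT (by name: the statement is the Claim_ definition above) =====
theorem bysite_spec : Claim_equal_bysite := by
  intro parsedlines _
  unfold Spec_bysite bysite
  cases parsedlines with
  | nil => simp [bysiteStep, bysite_alt_nil]
  | cons t ts =>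
    have h1 : bysiteStep (none, 0, 0, 0, ([] : List (Int × Option Int × Int × Int × Int))) t
        = (some t.1, 0 + t.2.2.1, 0 + t.2.2.2.1, 0 + t.2.2.2.2, []) := by
      simp [bysiteStep]
    simp only [List.cons_append, List.foldl_cons, h1, loop_eq, zero_add, List.nil_append]
    exact (bysite_alt_cons t ts).symm
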